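-- pv_equiv track=rewrite | github.com/Officialhimanshu710/DocuMind | app.py | find_relevant_context
-- ===== SOURCE A (Python) =====
-- def find_relevant_context(file_contents, user_question):
--     """
--     Search EVERY file individually to find the best match in each.
--     Then combine them.
--     """
--     question_words = set(user_question.lower().split())
--     best_chunks_from_all_files = []
--
--     for file_text in file_contents:
--         chunks = file_text.split('\n\n')
--         if len(chunks) < 3:
--             chunks = [file_text[i:i+1000] for i in range(0, len(file_text), 1000)]
--         scored_chunks = []
--         for chunk in chunks:
--             score = 0
--             chunk_lower = chunk.lower()
--             for word in question_words:
--                 if word in chunk_lower and len(word) > 3: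
--                     score += 1
--             scored_chunks.append((score, chunk))
--
--         scored_chunks.sort(key=lambda x: x[0], reverse=True)
--
--         if scored_chunks:
--             best_chunks_from_all_files.append(scored_chunks[0][1])
--             if len(scored_chunks) > 1:
--                 best_chunks_from_all_files.append(scored_chunks[1][1])
--
--     final_context = "\n---\n".join(best_chunks_from_all_files)
--
--     return final_context[:10000]
-- ===== SOURCE B (Python) =====
-- def find_relevant_context(file_contents, user_question):
--     """Same result as A, but picks each file's top-2 chunks in one selection
--     pass (best/second slots) instead of building and sorting a scored list."""
--     question_words = set(user_question.lower().split())
--     parts = []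
--     for file_text in file_contents:
--         chunks = file_text.split('\n\n')
--         if len(chunks) < 3:
--             chunks = [file_text[i:i+1000] for i in range(0, len(file_text), 1000)]
--         best = None
--         second = None
--         for chunk in chunks:
--             lower = chunk.lower()
--             score = sum(1 for w in question_words if w in lower and len(w) > 3)
--             if best is None or score > best[0]:
--                 second = best
--                 best = (score, chunk)
--             elif second is None or score > second[0]:
--                 second = (score, chunk)
--         if best is not None:
--             parts.append(best[1])
--             if second is not None:
--                 parts.append(second[1])
--     return "\n---\n".join(parts)[:10000]
-- ===== Notes on version B (the rewrite author's own statement) =====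
-- stated objective: alternative
-- what changed: Per file, the top-2 chunks are found in a single selection pass maintaining best/second slots (strict > keeps the stable-sort tie order) instead of building a scored list and sorting it in reverse.
import Mathlib
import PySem

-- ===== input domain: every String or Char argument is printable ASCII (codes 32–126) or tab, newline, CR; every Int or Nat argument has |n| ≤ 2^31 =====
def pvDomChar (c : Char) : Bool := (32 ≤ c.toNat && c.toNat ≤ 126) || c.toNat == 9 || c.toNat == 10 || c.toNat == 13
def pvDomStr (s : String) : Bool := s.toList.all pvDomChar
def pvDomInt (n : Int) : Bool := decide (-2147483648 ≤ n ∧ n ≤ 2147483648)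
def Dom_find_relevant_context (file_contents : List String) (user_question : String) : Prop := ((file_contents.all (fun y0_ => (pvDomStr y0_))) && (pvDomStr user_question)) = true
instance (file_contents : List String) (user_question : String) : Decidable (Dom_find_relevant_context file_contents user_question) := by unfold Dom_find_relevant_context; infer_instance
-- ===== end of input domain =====

-- B replaces A's per-file sort-then-take-two by a single best/second selection pass; same result, no sort.

-- ===== PORT A =====
-- file_text.split('\n\n'): sep ≠ "", so split? is always `some`; .getD [] is exact here
def pvChunks (file_text : String) : List String :=
  let chunks0 := (PySem.Str.split? file_text "\n\n").getD []
  if chunks0.length < 3 then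
    (PySem.List.pyRange 0 (PySem.Str.len file_text) 1000).map
      (fun i => PySem.Str.slice file_text (some i) (some (i + 1000)))
  else chunks0

-- body of A's outer loop, one file
def pvFileA (question_words : PySem.Set String) (best_chunks : List String) (file_text : String) : List String :=
  let chunks := pvChunks file_text
  let scored_chunks := chunks.foldl (fun sc chunk =>
    let chunk_lower := PySem.Str.lower chunk
    let score := question_words.foldl (fun s word =>
      if PySem.Str.isIn word chunk_lower && decide (3 < PySem.Str.len word) then s + 1 else s) (0 : Int)
    sc ++ [(score, chunk)]) []
  let sorted := PySem.List.sorted scored_chunks (fun x => x.1) true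
  match sorted with
  | [] => best_chunks
  | [a] => best_chunks ++ [a.2]
  | a :: b :: _ => best_chunks ++ [a.2] ++ [b.2]

def find_relevant_context (file_contents : List String) (user_question : String) : String :=
  let question_words : PySem.Set String := PySem.Set.ofList (PySem.Str.split₀ (PySem.Str.lower user_question))
  let best_chunks_from_all_files := file_contents.foldl (pvFileA question_words) []
  PySem.Str.slice (PySem.Str.join "\n---\n" best_chunks_from_all_files) none (some 10000)

-- ===== PORT B =====
def pvSelStep (st : Option (Int × String) × Option (Int × String)) (score : Int) (chunk : String) :
    Option (Int × String) × Option (Int × String) :=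
  match st with
  | (none, _) => (some (score, chunk), none)
  | (some b, s) =>
    if score > b.1 then (some (score, chunk), some b)
    else match s with
      | none => (some b, some (score, chunk))
      | some sec => if score > sec.1 then (some b, some (score, chunk)) else (some b, some sec)

-- body of B's outer loop, one file: a single best/second selection pass
def pvFileB (question_words : PySem.Set String) (parts : List String) (file_text : String) : List String :=
  let chunks := pvChunks file_text
  let st := chunks.foldl (fun st chunk =>
    let lower := PySem.Str.lower chunk
    let score : Int := (question_words.countP
        (fun w => PySem.Str.isIn w lower && decide (3 < PySem.Str.len w)) : Nat)
    pvSelStep st score chunk) (none, none)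
  match st with
  | (none, _) => parts
  | (some b, none) => parts ++ [b.2]
  | (some b, some s) => parts ++ [b.2, s.2]

def find_relevant_context_alt (file_contents : List String) (user_question : String) : String :=
  let question_words : PySem.Set String := PySem.Set.ofList (PySem.Str.split₀ (PySem.Str.lower user_question))
  let parts := file_contents.foldl (pvFileB question_words) []
  PySem.Str.slice (PySem.Str.join "\n---\n" parts) none (some 10000)

-- ===== PRECONDITION & SPEC =====
def Spec_find_relevant_context (file_contents : List String) (user_question : String) (out : String) : Prop := out = find_relevant_context_alt file_contents user_question
instance (file_contents : List String) (user_question : String) (out : String) : Decidable (Spec_find_relevant_context file_contents user_question out) := by unfold Spec_find_relevant_context; infer_instance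

-- ===== CLAIM (what is proved, stated in full; the proofs are below) =====
def Claim_equal_find_relevant_context : Prop := ∀ (file_contents : List String) (user_question : String), Dom_find_relevant_context file_contents user_question → Spec_find_relevant_context file_contents user_question (find_relevant_context file_contents user_question)

-- ===== LEMMAS AND PROOFS =====

-- equation lemmas for PySem.List.insertBy (defined by structural recursion)
theorem pv_insertBy_nil {α : Type} (before : α → α → Bool) (x : α) :
    PySem.List.insertBy before x [] = [x] := rfl

theorem pv_insertBy_cons {α : Type} (before : α → α → Bool) (x y : α) (ys : List α) :
    PySem.List.insertBy before x (y :: ys) =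
      if before x y then x :: y :: ys else y :: PySem.List.insertBy before x ys := by
  rw [PySem.List.insertBy]

-- first two elements of a list, as a selection state
def pvTop2 (l : List (Int × String)) : Option (Int × String) × Option (Int × String) :=
  (l[0]?, l[1]?)

-- inserting into the accumulator moves the first two elements exactly as the selection step does
theorem pvTop2_insertBy (x : Int × String) (acc : List (Int × String)) :
    pvTop2 (PySem.List.insertBy (fun a b => decide (b.1 < a.1)) x acc) =
      pvSelStep (pvTop2 acc) x.1 x.2 := by
  match acc with
  | [] => simp [pv_insertBy_nil, pvTop2, pvSelStep]
  | [b] =>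
    by_cases h : b.1 < x.1 <;>
      simp [pv_insertBy_cons, pv_insertBy_nil, pvTop2, pvSelStep, h, gt_iff_lt]
  | b :: sec :: rest =>
    by_cases h1 : b.1 < x.1
    · simp [pv_insertBy_cons, pvTop2, pvSelStep, h1, gt_iff_lt]
    · by_cases h2 : sec.1 < x.1 <;>
        simp [pv_insertBy_cons, pvTop2, pvSelStep, h1, h2, gt_iff_lt]

theorem pvTop2_foldl (l : List (Int × String)) (acc : List (Int × String)) :
    pvTop2 (l.foldl (fun a x => PySem.List.insertBy (fun a b => decide (b.1 < a.1)) x a) acc) =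
      l.foldl (fun st x => pvSelStep st x.1 x.2) (pvTop2 acc) := by
  induction l generalizing acc with
  | nil => rfl
  | cons x xs ih => simp only [List.foldl_cons, ih, pvTop2_insertBy]

-- the selection pass computes the first two elements of the reverse-sorted list
theorem pvSel_eq_pvTop2_sorted (l : List (Int × String)) :
    l.foldl (fun st x => pvSelStep st x.1 x.2) (none, none) =
      pvTop2 (PySem.List.sorted l (fun x => x.1) true) := by
  rw [PySem.List.sorted]
  simp only [if_true]
  rw [pvTop2_foldl]
  rfl

-- the per-file loop bodies agree
theorem pvFile_eq (qw : PySem.Set String) (acc : List String) (file_text : String) :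
    pvFileA qw acc file_text = pvFileB qw acc file_text := by
  unfold pvFileA pvFileB
  have hscore : ∀ chunk : String,
      qw.foldl (fun s word =>
        if PySem.Str.isIn word (PySem.Str.lower chunk) && decide (3 < PySem.Str.len word)
        then s + 1 else s) (0 : Int) =
      ((qw.countP (fun w => PySem.Str.isIn w (PySem.Str.lower chunk)
          && decide (3 < PySem.Str.len w)) : Nat) : Int) := by
    intro chunk
    simpa using PySem.List.foldl_count_if
      (fun w => PySem.Str.isIn w (PySem.Str.lower chunk) && decide (3 < PySem.Str.len w)) qw 0
  simp only [hscore, PySem.List.foldl_append_singleton_eq_map, List.nil_append]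
  have hB : (pvChunks file_text).foldl (fun st chunk =>
        pvSelStep st ((qw.countP (fun w => PySem.Str.isIn w (PySem.Str.lower chunk)
          && decide (3 < PySem.Str.len w)) : Nat) : Int) chunk) (none, none) =
      ((pvChunks file_text).map (fun chunk =>
        (((qw.countP (fun w => PySem.Str.isIn w (PySem.Str.lower chunk)
          && decide (3 < PySem.Str.len w)) : Nat) : Int), chunk))).foldl
        (fun st x => pvSelStep st x.1 x.2) (none, none) :=
    (List.foldl_map
      (f := fun chunk => (((qw.countP (fun w => PySem.Str.isIn w (PySem.Str.lower chunk)
        && decide (3 < PySem.Str.len w)) : Nat) : Int), chunk))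
      (g := fun st x => pvSelStep st x.1 x.2)
      (l := pvChunks file_text) (init := (none, none))).symm
  rw [hB, pvSel_eq_pvTop2_sorted]
  generalize PySem.List.sorted ((pvChunks file_text).map (fun chunk =>
      (((qw.countP (fun w => PySem.Str.isIn w (PySem.Str.lower chunk)
        && decide (3 < PySem.Str.len w)) : Nat) : Int), chunk))) (fun x => x.1) true = sl
  match sl with
  | [] => rfl
  | [a] => rfl
  | a :: b :: t => simp [pvTop2]

-- ===== VERDICT (by name: the statement is the Claim_ definition above) =====
set_option maxHeartbeats 1000000 in
theorem find_relevant_context_spec : Claim_equal_find_relevant_context := by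
  intro file_contents user_question _
  have h : ∀ qw : PySem.Set String, pvFileA qw = pvFileB qw :=
    fun qw => funext fun a => funext fun ft => pvFile_eq qw a ft
  show find_relevant_context file_contents user_question
      = find_relevant_context_alt file_contents user_question
  simp only [find_relevant_context, find_relevant_context_alt, h]
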